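-- pv_equiv track=rewrite | github.com/NingLiu80/Mario_Kart_League_Matchmaker | MarioKartLeague.py | createMatchesFor4PlayersInRow
-- ===== SOURCE A (Python) =====
-- def createMatchesFor4PlayersInRow(actPlayerIdx, players_in_row):
--     listOfMatches = []
--
--     while(max(players_in_row)>0):
--         singleMatch = []
--
--         # Enumerate the list to get indices and values, then sort by values
--         sorted_indices = sorted(enumerate(players_in_row), key=lambda x: x[1], reverse=True)
--
--         # Take the indices of the first 3 highest values
--         top_3_indices = [index for index, _ in sorted_indices[:3]]
--
--         singleMatch.append(actPlayerIdx)
--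
--         # check each player if they still need to play
--         for playerIdx in top_3_indices:
--             if (players_in_row[playerIdx]>0):
--                 # add to single match
--                 singleMatch.append(playerIdx)
--                 #remove the times to play
--                 players_in_row[playerIdx]-=1
--
--         listOfMatches.append(singleMatch)
--
--     return listOfMatches
-- ===== SOURCE B (Python) =====
-- # B: per round, a single O(n) selection scan keeps only the top-3 (value desc, index asc)
-- # candidates in a tiny buffer, instead of A's full O(n log n) sort of all players each round.
-- # Like A, it decrements players_in_row in place.
-- def createMatchesFor4PlayersInRow(actPlayerIdx, players_in_row):
--     listOfMatches = []
--     while True: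
--         # one pass: buffer of up to 3 best (index, value), ordered by value desc, ties index asc
--         best = []
--         for i, v in enumerate(players_in_row):
--             best = _insert3(best, (i, v))
--         if not best or best[0][1] <= 0:
--             break
--         singleMatch = [actPlayerIdx]
--         for i, _ in best:
--             if players_in_row[i] > 0:
--                 singleMatch.append(i)
--                 players_in_row[i] -= 1
--         listOfMatches.append(singleMatch)
--     return listOfMatches
--
-- def _insert3(best, p):
--     out = []
--     k = 0
--     while k < len(best) and best[k][1] >= p[1]:
--         out.append(best[k])
--         k += 1
--     out.append(p)
--     out.extend(best[k:])
--     return out[:3]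
-- ===== Notes on version B (the rewrite author's own statement) =====
-- stated objective: alternative
-- what changed: Each round, A fully stable-sorts all n enumerated players by count (reverse=True) and takes the first 3; B instead makes a single selection pass keeping only a bounded 3-element best-buffer (value desc, ties index asc), so no full sort is built.
import Mathlib
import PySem

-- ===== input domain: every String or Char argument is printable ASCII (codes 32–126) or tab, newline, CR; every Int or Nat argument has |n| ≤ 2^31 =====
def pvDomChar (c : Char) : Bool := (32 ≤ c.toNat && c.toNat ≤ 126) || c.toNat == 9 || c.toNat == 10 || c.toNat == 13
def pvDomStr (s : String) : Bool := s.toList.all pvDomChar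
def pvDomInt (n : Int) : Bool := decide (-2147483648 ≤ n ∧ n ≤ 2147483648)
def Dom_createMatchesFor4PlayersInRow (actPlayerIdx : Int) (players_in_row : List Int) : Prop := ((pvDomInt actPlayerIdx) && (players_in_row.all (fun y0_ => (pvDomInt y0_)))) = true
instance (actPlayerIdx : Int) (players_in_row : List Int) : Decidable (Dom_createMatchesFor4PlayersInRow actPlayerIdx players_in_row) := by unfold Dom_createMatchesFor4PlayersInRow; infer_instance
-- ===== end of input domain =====

-- B replaces A's per-round full stable sort of all players by a single selection pass that
-- keeps only a 3-element best-buffer (value desc, ties index asc); both Pythons decrement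
-- players_in_row in place the same way — the equivalence proved here is about the return value.

-- ===== PORT A =====
-- while-loop measure: total remaining positive play count
def pvPosSum (l : List Int) : Nat := (l.map Int.toNat).sum

-- the body of the inner for-loop, textually identical in both Pythons:
-- 'if players_in_row[i] > 0: singleMatch.append(i); players_in_row[i] -= 1'
-- (state = (singleMatch, players_in_row); i comes from enumerate, so 0 ≤ i < len and pyGetD/set are exact)
def pvStep (st : List Int × List Int) (i : Int) : List Int × List Int :=
  if 0 < PySem.List.pyGetD st.2 i 0 then
    (st.1 ++ [i], st.2.set i.toNat (PySem.List.pyGetD st.2 i 0 - 1))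
  else st

-- (the lemmas up to the ports are cited by the ports' decreasing_by)
lemma pvSum_set_lt (l : List Nat) (n : Nat) (x : Nat) (h : n < l.length) (hx : x < l[n]) :
    (l.set n x).sum < l.sum := by
  induction l generalizing n with
  | nil => simp at h
  | cons a l ih =>
    cases n with
    | zero => simp at hx ⊢; omega
    | succ n =>
      simp only [List.set_cons_succ, List.sum_cons]
      have := ih n (by simpa using h) (by simpa using hx)
      omega

lemma pvPosSum_set_lt (l : List Int) (i : Int) (hi : 0 ≤ i)
    (hv : 0 < PySem.List.pyGetD l i 0) :
    pvPosSum (l.set i.toNat (PySem.List.pyGetD l i 0 - 1)) < pvPosSum l := by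
  have hn : i.toNat < l.length := by
    rcases Nat.lt_or_ge i.toNat l.length with h | h
    · exact h
    · rw [PySem.List.pyGetD_of_nonneg l 0 hi, List.getD_eq_default _ _ h] at hv
      omega
  have hv' : PySem.List.pyGetD l i 0 = l[i.toNat] := by
    rw [PySem.List.pyGetD_of_nonneg l 0 hi, List.getD_eq_getElem]
  unfold pvPosSum
  rw [List.map_set]
  refine pvSum_set_lt _ _ _ (by simpa using hn) ?_
  rw [List.getElem_map]
  rw [hv'] at hv ⊢
  omega

lemma pvStep_le (st : List Int × List Int) (i : Int) (hi : 0 ≤ i) :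
    pvPosSum (pvStep st i).2 ≤ pvPosSum st.2 := by
  unfold pvStep
  split
  · exact le_of_lt (pvPosSum_set_lt st.2 i hi (by assumption))
  · exact le_refl _

lemma pvFoldStep_le (idxs : List Int) (h : ∀ i ∈ idxs, 0 ≤ i) (st : List Int × List Int) :
    pvPosSum (List.foldl pvStep st idxs).2 ≤ pvPosSum st.2 := by
  induction idxs generalizing st with
  | nil => exact le_refl _
  | cons i idxs ih =>
    simp only [List.foldl_cons]
    exact le_trans (ih (fun j hj => h j (List.mem_cons_of_mem _ hj)) _)
      (pvStep_le st i (h i (List.mem_cons_self)))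

lemma pvEnum_fst_nonneg {players : List Int} {q : Int × Int}
    (hq : q ∈ PySem.List.enumerate players 0) : 0 ≤ q.1 := by
  obtain ⟨k, hk, rfl⟩ := (PySem.List.mem_enumerate_iff _ _ _).mp hq
  simp

lemma pvEnum_getD {players : List Int} {q : Int × Int}
    (hq : q ∈ PySem.List.enumerate players 0) :
    PySem.List.pyGetD players q.1 0 = q.2 := by
  obtain ⟨k, hk, rfl⟩ := (PySem.List.mem_enumerate_iff _ _ _).mp hq
  simp only [zero_add]
  rw [PySem.List.pyGetD_eq_getElem players 0 (by omega) (by simpa using hk)]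
  simp

lemma pvRound_lt (players : List Int) (a : Int) (p : Int × Int) (t : List (Int × Int))
    (hs : PySem.List.sorted (PySem.List.enumerate players 0) (fun x => x.2) true = p :: t)
    (hp : 0 < p.2) :
    pvPosSum (List.foldl pvStep ([a], players)
      (List.map (fun q => q.1) (List.take 3 (p :: t)))).2 < pvPosSum players := by
  have hpmem : p ∈ PySem.List.enumerate players 0 :=
    (PySem.List.mem_sorted _ _ _ _).mp (hs ▸ List.mem_cons_self)
  have h1 : 0 ≤ p.1 := pvEnum_fst_nonneg hpmem
  have hv : 0 < PySem.List.pyGetD players p.1 0 := by rw [pvEnum_getD hpmem]; exact hp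
  simp only [List.take_succ_cons, List.map_cons, List.foldl_cons]
  refine lt_of_le_of_lt (pvFoldStep_le _ ?_ _) ?_
  · intro i hi
    obtain ⟨q, hq, rfl⟩ := List.mem_map.mp hi
    exact pvEnum_fst_nonneg ((PySem.List.mem_sorted _ _ _ _).mp
      (hs ▸ List.mem_cons_of_mem _ (List.mem_of_mem_take hq)))
  · show pvPosSum (pvStep ([a], players) p.1).2 < pvPosSum players
    unfold pvStep
    rw [if_pos hv]
    exact pvPosSum_set_lt players p.1 h1 hv

lemma pvMaxHead_eq {players : List Int} {m : Int} {p : Int × Int} {t : List (Int × Int)}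
    (hm : PySem.List.max? players (fun x => x) = some m)
    (hs : PySem.List.sorted (PySem.List.enumerate players 0) (fun x => x.2) true = p :: t) :
    p.2 = m := by
  apply le_antisymm
  · obtain ⟨k, hk, rfl⟩ := (PySem.List.mem_enumerate_iff _ _ _).mp
      ((PySem.List.mem_sorted _ _ _ _).mp (hs ▸ List.mem_cons_self))
    exact PySem.List.max?_isMax hm _ (List.getElem_mem hk)
  · obtain ⟨k, hk, hkm⟩ := List.mem_iff_getElem.mp (PySem.List.max?_mem hm)
    have := PySem.List.key_head_sorted_rev_ge _ _ hs ((0 : Int) + k, players[k])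
      ((PySem.List.mem_enumerate_iff _ _ _).mpr ⟨k, hk, rfl⟩)
    simpa [hkm] using this

lemma pvSorted_cons {players : List Int} {m : Int}
    (hm : PySem.List.max? players (fun x => x) = some m) :
    ∃ p t, PySem.List.sorted (PySem.List.enumerate players 0) (fun x => x.2) true = p :: t ∧ p.2 = m := by
  have hne : players ≠ [] := by
    intro h
    rw [h, (PySem.List.max?_eq_none_iff ([] : List Int) (fun x => x)).mpr rfl] at hm
    cases hm
  have hene : PySem.List.enumerate players 0 ≠ [] := by
    intro h
    have hl := congrArg List.length h
    rw [PySem.List.length_enumerate] at hl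
    exact hne (List.eq_nil_of_length_eq_zero hl)
  cases hss : PySem.List.sorted (PySem.List.enumerate players 0) (fun x => x.2) true with
  | nil => exact absurd ((PySem.List.sorted_eq_nil_iff _ _ _).mp hss) hene
  | cons p t => exact ⟨p, t, rfl, pvMaxHead_eq hm hss⟩

lemma pvGoA_dec (players : List Int) (m a : Int)
    (hm : PySem.List.max? players (fun x => x) = some m) (hpos : 0 < m) :
    pvPosSum (List.foldl pvStep ([a], players)
      (List.map (fun p => p.1)
        (List.take 3 (PySem.List.sorted (PySem.List.enumerate players 0) (fun x => x.2) true)))).2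
      < pvPosSum players := by
  obtain ⟨p, t, hs, hp2⟩ := pvSorted_cons hm
  rw [hs]
  exact pvRound_lt players a p t hs (hp2 ▸ hpos)

-- port of A: the while-loop as a recursion on the remaining positive play count;
-- 'max(players_in_row)' raises ValueError on [] in Python — that case (max? = none) is excluded by Pre_
def pvGoA (actPlayerIdx : Int) (players : List Int) (acc : List (List Int)) : List (List Int) :=
  match hm : PySem.List.max? players (fun x => x) with
  | none => acc
  | some m =>
    if hpos : 0 < m then
      let sorted_indices := PySem.List.sorted (PySem.List.enumerate players 0) (fun x => x.2) true
      let top_3_indices := List.map (fun p => p.1) (List.take 3 sorted_indices)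
      let st := List.foldl pvStep ([actPlayerIdx], players) top_3_indices
      pvGoA actPlayerIdx st.2 (acc ++ [st.1])
    else acc
termination_by pvPosSum players
decreasing_by exact pvGoA_dec players m actPlayerIdx hm hpos

def createMatchesFor4PlayersInRow (actPlayerIdx : Int) (players_in_row : List Int) : List (List Int) :=
  pvGoA actPlayerIdx players_in_row []

-- ===== PORT B =====
-- _insert3's scan: walk past entries with value ≥ p's, insert p, keep the first 3
def pvIns (p : Int × Int) : List (Int × Int) → List (Int × Int)
  | [] => [p]
  | q :: qs => if p.2 ≤ q.2 then q :: pvIns p qs else p :: q :: qs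

def pvInsert3 (best : List (Int × Int)) (p : Int × Int) : List (Int × Int) :=
  List.take 3 (pvIns p best)

-- (lemmas cited by pvGoB's decreasing_by)
lemma pvIns_eq_insertBy (p : Int × Int) (l : List (Int × Int)) :
    pvIns p l = PySem.List.insertBy (fun a b => decide (b.2 < a.2)) p l := by
  induction l with
  | nil => rfl
  | cons q qs ih =>
    simp only [pvIns, PySem.List.insertBy]
    by_cases h : p.2 ≤ q.2
    · rw [if_pos h, if_neg (by simpa using h), ih]
    · rw [if_neg h, if_pos (by simp; omega)]

lemma pvTake_cons_take {α : Type} (k : Nat) (y : α) (ys : List α) :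
    List.take k (y :: List.take k ys) = List.take k (y :: ys) := by
  cases k with
  | zero => simp
  | succ m => simp [List.take_take]

lemma pvTake_insertBy {α : Type} (b : α → α → Bool) (x : α) (k : Nat) (l : List α) :
    List.take k (PySem.List.insertBy b x (List.take k l))
      = List.take k (PySem.List.insertBy b x l) := by
  induction l generalizing k with
  | nil => simp
  | cons y ys ih =>
    cases k with
    | zero => simp [PySem.List.insertBy]
    | succ m =>
      simp only [List.take_succ_cons, PySem.List.insertBy]
      by_cases hb : b x y
      · rw [if_pos hb, if_pos hb]
        simp only [List.take_succ_cons]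
        rw [pvTake_cons_take]
      · rw [if_neg hb, if_neg hb]
        simp only [List.take_succ_cons]
        rw [ih]

lemma pvBuffer_aux (xs : List (Int × Int)) :
    ∀ acc, List.foldl pvInsert3 (List.take 3 acc) xs
      = List.take 3 (List.foldl
          (fun acc x => PySem.List.insertBy (fun a b => decide (b.2 < a.2)) x acc) acc xs) := by
  induction xs with
  | nil => intro acc; rfl
  | cons x xs ih =>
    intro acc
    simp only [List.foldl_cons]
    have hstep : pvInsert3 (List.take 3 acc) x
        = List.take 3 (PySem.List.insertBy (fun a b => decide (b.2 < a.2)) x acc) := by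
      unfold pvInsert3
      rw [pvIns_eq_insertBy, pvTake_insertBy]
    rw [hstep, ih]

lemma pvBuffer_eq (xs : List (Int × Int)) :
    List.foldl pvInsert3 [] xs
      = List.take 3 (PySem.List.sorted xs (fun x => x.2) true) := by
  have h := pvBuffer_aux xs []
  simpa [PySem.List.sorted_rev_eq_foldl_insertBy] using h

lemma pvGoB_dec (players : List Int) (a : Int) (p : Int × Int) (rest : List (Int × Int))
    (hb : List.foldl pvInsert3 [] (PySem.List.enumerate players 0) = p :: rest)
    (hpos : 0 < p.2) :
    pvPosSum (List.foldl (fun st (q : Int × Int) => pvStep st q.1) ([a], players) (p :: rest)).2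
      < pvPosSum players := by
  rw [pvBuffer_eq] at hb
  cases hss : PySem.List.sorted (PySem.List.enumerate players 0) (fun x => x.2) true with
  | nil => rw [hss] at hb; simp at hb
  | cons p' t =>
    rw [hss, List.take_succ_cons] at hb
    injection hb with h1 h2
    subst h1
    subst h2
    rw [← List.foldl_map (f := fun q : Int × Int => q.1) (g := pvStep), ← List.take_succ_cons]
    exact pvRound_lt players a _ _ hss hpos

-- port of B: each round builds the 3-element best-buffer by one foldl over enumerate,
-- then plays the same inner loop; empty buffer or non-positive best value stops the loop
def pvGoB (actPlayerIdx : Int) (players : List Int) (acc : List (List Int)) : List (List Int) :=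
  match hb : List.foldl pvInsert3 [] (PySem.List.enumerate players 0) with
  | [] => acc
  | p :: rest =>
    if hpos : 0 < p.2 then
      let st := List.foldl (fun st (q : Int × Int) => pvStep st q.1) ([actPlayerIdx], players) (p :: rest)
      pvGoB actPlayerIdx st.2 (acc ++ [st.1])
    else acc
termination_by pvPosSum players
decreasing_by exact pvGoB_dec players actPlayerIdx _ _ hb hpos

def createMatchesFor4PlayersInRow_alt (actPlayerIdx : Int) (players_in_row : List Int) : List (List Int) :=
  pvGoB actPlayerIdx players_in_row []

-- ===== PRECONDITION & SPEC =====
-- Pre_ excludes only the empty list, on which A's 'max(players_in_row)' raises ValueError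
def Pre_createMatchesFor4PlayersInRow (actPlayerIdx : Int) (players_in_row : List Int) : Prop :=
  players_in_row ≠ []
instance (actPlayerIdx : Int) (players_in_row : List Int) : Decidable (Pre_createMatchesFor4PlayersInRow actPlayerIdx players_in_row) := by unfold Pre_createMatchesFor4PlayersInRow; infer_instance
def pvWitness_createMatchesFor4PlayersInRow : Int × List Int := (0, [2, 1])

def Spec_createMatchesFor4PlayersInRow (actPlayerIdx : Int) (players_in_row : List Int) (out : List (List Int)) : Prop := out = createMatchesFor4PlayersInRow_alt actPlayerIdx players_in_row
instance (actPlayerIdx : Int) (players_in_row : List Int) (out : List (List Int)) : Decidable (Spec_createMatchesFor4PlayersInRow actPlayerIdx players_in_row out) := by unfold Spec_createMatchesFor4PlayersInRow; infer_instance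

-- ===== CLAIM (what is proved, stated in full; the proofs are below) =====
def Claim_equal_createMatchesFor4PlayersInRow : Prop := ∀ (actPlayerIdx : Int) (players_in_row : List Int), Dom_createMatchesFor4PlayersInRow actPlayerIdx players_in_row → Pre_createMatchesFor4PlayersInRow actPlayerIdx players_in_row → Spec_createMatchesFor4PlayersInRow actPlayerIdx players_in_row (createMatchesFor4PlayersInRow actPlayerIdx players_in_row)

-- ===== LEMMAS AND PROOFS =====

lemma pvGoA_none (a : Int) (players : List Int) (acc : List (List Int))
    (hm : PySem.List.max? players (fun x => x) = none) :
    pvGoA a players acc = acc := by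
  rw [pvGoA]
  split
  · rfl
  · rename_i m heq
    rw [hm] at heq
    cases heq

lemma pvGoA_some (a : Int) (players : List Int) (acc : List (List Int)) (m : Int)
    (hm : PySem.List.max? players (fun x => x) = some m) :
    pvGoA a players acc =
      if 0 < m then
        pvGoA a (List.foldl pvStep ([a], players)
          (List.map (fun p => p.1)
            (List.take 3 (PySem.List.sorted (PySem.List.enumerate players 0) (fun x => x.2) true)))).2
          (acc ++ [(List.foldl pvStep ([a], players)
            (List.map (fun p => p.1)
              (List.take 3 (PySem.List.sorted (PySem.List.enumerate players 0) (fun x => x.2) true)))).1])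
      else acc := by
  rw [pvGoA]
  split
  · rename_i heq; rw [hm] at heq; cases heq
  · rename_i m' heq
    rw [hm] at heq
    cases heq
    split <;> rfl

lemma pvGoB_cons (a : Int) (players : List Int) (acc : List (List Int))
    (p : Int × Int) (rest : List (Int × Int))
    (hb : List.foldl pvInsert3 [] (PySem.List.enumerate players 0) = p :: rest) :
    pvGoB a players acc =
      if 0 < p.2 then
        pvGoB a (List.foldl (fun st (q : Int × Int) => pvStep st q.1) ([a], players) (p :: rest)).2
          (acc ++ [(List.foldl (fun st (q : Int × Int) => pvStep st q.1) ([a], players) (p :: rest)).1])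
      else acc := by
  rw [pvGoB]
  split
  · rename_i heq; rw [hb] at heq; cases heq
  · rename_i p' rest' heq
    rw [hb] at heq
    obtain ⟨rfl, rfl⟩ : p' = p ∧ rest' = rest := by
      constructor <;> [exact (List.cons.inj heq).1.symm; exact (List.cons.inj heq).2.symm]
    split <;> rfl

lemma pvGo_eq : ∀ (N : Nat) (players : List Int) (a : Int) (acc : List (List Int)),
    pvPosSum players < N → pvGoA a players acc = pvGoB a players acc := by
  intro N
  induction N with
  | zero => intro _ _ _ h; omega
  | succ N ih =>
    intro players a acc hlt
    cases hm : PySem.List.max? players (fun x => x) with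
    | none =>
      have hpl := (PySem.List.max?_eq_none_iff _ _).mp hm
      subst hpl
      rw [pvGoA_none a [] acc hm, pvGoB]
      rfl
    | some m =>
      obtain ⟨p, t, hs, hp2⟩ := pvSorted_cons hm
      have hb : List.foldl pvInsert3 [] (PySem.List.enumerate players 0) = p :: List.take 2 t := by
        rw [pvBuffer_eq, hs, List.take_succ_cons]
      rw [pvGoA_some a players acc m hm, pvGoB_cons a players acc p (List.take 2 t) hb, hp2]
      have hst : List.foldl (fun st (q : Int × Int) => pvStep st q.1) ([a], players) (p :: List.take 2 t)
          = List.foldl pvStep ([a], players)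
              (List.map (fun q : Int × Int => q.1)
                (List.take 3 (PySem.List.sorted (PySem.List.enumerate players 0) (fun x => x.2) true))) := by
        rw [hs, List.take_succ_cons, List.map_cons]
        simp only [List.foldl_cons]
        rw [List.foldl_map]
      rw [hst]
      by_cases hpos : 0 < m
      · rw [if_pos hpos, if_pos hpos]
        apply ih
        have hdec := pvGoA_dec players m a hm hpos
        omega
      · rw [if_neg hpos, if_neg hpos]

-- ===== VERDICT (by name: the statement is the Claim_ definition above) =====
theorem createMatchesFor4PlayersInRow_spec : Claim_equal_createMatchesFor4PlayersInRow := by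
  intro a ps _ _
  unfold Spec_createMatchesFor4PlayersInRow createMatchesFor4PlayersInRow createMatchesFor4PlayersInRow_alt
  exact pvGo_eq (pvPosSum ps + 1) ps a [] (by omega)
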